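-- pv_equiv track=rewrite | github.com/nacioboi/refvars | refvars/python_and_c_communication.py | request_giver_python
-- ===== SOURCE A (Python) =====
-- def request_giver_python(size:"int") -> "list[int]":
-- 	l:"list[str]" = []
-- 	for _ in range(0, size-4, 4):
-- 		l.append("a")
-- 		l.append("b")
-- 		l.append("c")
-- 		l.append(" ")
-- 	x:"list[int]" = []
-- 	for b in l:
-- 		x.append(ord(b))
-- 	return x
-- ===== SOURCE B (Python) =====
-- def request_giver_python(size: "int") -> "list[int]":
--     n = max(0, (size - 1) // 4)
--     return [97, 98, 99, 32] * n
-- ===== Notes on version B (the rewrite author's own statement) =====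
-- stated objective: simpler
-- what changed: Replaces the character-append loop and the ord-conversion loop with a closed-form repeat count max(0,(size-1)//4) and a single list multiplication of the literal code pattern [97,98,99,32].
import Mathlib
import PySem

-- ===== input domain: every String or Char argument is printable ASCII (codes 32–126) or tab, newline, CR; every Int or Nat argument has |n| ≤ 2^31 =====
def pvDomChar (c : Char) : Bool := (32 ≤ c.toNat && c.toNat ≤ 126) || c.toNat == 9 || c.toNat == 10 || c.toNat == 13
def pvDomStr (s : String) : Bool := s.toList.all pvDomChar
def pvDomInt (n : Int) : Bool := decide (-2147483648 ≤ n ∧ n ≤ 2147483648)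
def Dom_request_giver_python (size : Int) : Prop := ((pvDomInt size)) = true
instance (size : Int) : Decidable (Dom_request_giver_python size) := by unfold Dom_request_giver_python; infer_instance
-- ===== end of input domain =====

-- B replaces A's two loops (char appends, then ord conversion) with a closed-form
-- repeat count max(0,(size-1)//4) and a list multiplication of [97,98,99,32]: simpler.


-- ===== PORT A =====
-- ord(s) for a one-character string: its code point (exact here; the loop only feeds
-- the one-character literals "a" "b" "c" " ").
def pyOrd (s : String) : Int :=
  match s.toList with
  | [c] => (c.toNat : Int)
  | _ => 0

def request_giver_python (size : Int) : List Int :=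
  let l : List String :=
    (PySem.List.pyRange 0 (size - 4) 4).foldl
      (fun l _ => ((((l ++ ["a"]) ++ ["b"]) ++ ["c"]) ++ [" "])) []
  l.foldl (fun x b => x ++ [pyOrd b]) []

-- ===== PORT B =====
def request_giver_python_alt (size : Int) : List Int :=
  let n : Int := max 0 (PySem.Int.floordiv (size - 1) 4)
  (List.replicate n.toNat [97, 98, 99, 32]).flatten

-- ===== PRECONDITION & SPEC =====
def Spec_request_giver_python (size : Int) (out : List Int) : Prop := out = request_giver_python_alt size
instance (size : Int) (out : List Int) : Decidable (Spec_request_giver_python size out) := by unfold Spec_request_giver_python; infer_instance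

-- ===== CLAIM (what is proved, stated in full; the proofs are below) =====
def Claim_equal_request_giver_python : Prop := ∀ (size : Int), Dom_request_giver_python size → Spec_request_giver_python size (request_giver_python size)

-- ===== LEMMAS AND PROOFS =====

-- A's first loop builds (length of the range) copies of ["a","b","c"," "].
theorem foldl_pattern (xs : List Int) (acc : List String) :
    xs.foldl (fun l _ => ((((l ++ ["a"]) ++ ["b"]) ++ ["c"]) ++ [" "])) acc
      = acc ++ (List.replicate xs.length ["a", "b", "c", " "]).flatten := by
  induction xs generalizing acc with
  | nil => simp
  | cons y ys ih => simp [List.foldl_cons, List.replicate_succ]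

-- A's second loop is a map.
theorem foldl_ord (l : List String) (acc : List Int) :
    l.foldl (fun x b => x ++ [pyOrd b]) acc = acc ++ l.map pyOrd := by
  induction l generalizing acc with
  | nil => simp
  | cons y ys ih => simp [List.foldl_cons, ih]

theorem request_giver_python_spec : Claim_equal_request_giver_python := by
  intro size _
  unfold Spec_request_giver_python request_giver_python request_giver_python_alt
  rw [foldl_pattern, foldl_ord]
  rw [PySem.List.pyRange_of_pos 0 (size - 4) (by norm_num)]
  rw [PySem.Int.floordiv_eq_ediv_of_pos (by norm_num)]
  simp only [List.length_map, List.length_range, List.nil_append, List.map_flatten,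
    List.map_replicate]
  have hcount : (if (0 : Int) < size - 4 then ((size - 4 - 0 + 4 - 1) / 4).toNat else 0)
      = (max 0 ((size - 1) / 4)).toNat := by
    split_ifs with h <;> omega
  rw [hcount]
  norm_num [pyOrd]
  congr 2
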